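-- pv_equiv track=rewrite | github.com/Holmes-Holmes/Holmes-Holmes.github.io | Holmes/ApproachImp/EvidenceGather/ComponentDBFeatureGenerate.py | distance2rank
-- ===== SOURCE A (Python) =====
-- from collections import defaultdict
--
-- def distance2rank(component_dic):
--
--     value_count = defaultdict(list)
--
--
--     for key, value in component_dic.items():
--
--         value_count[value].append(key)
--
--
--     sorted_values = sorted(value_count.keys(), reverse=True)
--     value_mapping = {value: i+1 for i, value in enumerate(sorted_values)}
--
--
--     rank_dict = {}
--     for key, value in component_dic.items():
--         rank = value_mapping[value]
--         rank_dict[key] = rank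
--     return rank_dict
-- ===== SOURCE B (Python) =====
-- def distance2rank(component_dic):
--     # rank of a value = 1 + number of distinct values strictly greater than it
--     distinct = set(component_dic.values())
--     return {key: 1 + sum(1 for d in distinct if d > value)
--             for key, value in component_dic.items()}
-- ===== Notes on version B (the rewrite author's own statement) =====
-- stated objective: simpler
-- what changed: Replaces the group-keys-by-value / sort-distinct-values / enumerate-into-a-mapping pipeline by a direct one-liner: each key's rank is 1 + the number of distinct values strictly greater than its value.
import Mathlib
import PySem

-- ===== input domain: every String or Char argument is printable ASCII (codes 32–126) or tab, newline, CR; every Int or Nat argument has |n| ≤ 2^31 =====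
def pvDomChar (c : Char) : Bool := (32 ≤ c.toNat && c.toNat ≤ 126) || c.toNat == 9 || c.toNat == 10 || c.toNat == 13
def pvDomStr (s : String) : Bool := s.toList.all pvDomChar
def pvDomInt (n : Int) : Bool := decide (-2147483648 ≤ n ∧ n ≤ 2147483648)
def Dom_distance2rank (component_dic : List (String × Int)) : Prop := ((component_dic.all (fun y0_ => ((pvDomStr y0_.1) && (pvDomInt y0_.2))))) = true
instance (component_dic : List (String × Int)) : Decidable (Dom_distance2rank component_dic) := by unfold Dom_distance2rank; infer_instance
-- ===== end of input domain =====

-- B replaces A's group-by-value / sort / enumerate pipeline with a direct count of strictly greater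
-- distinct values per key (objective: simpler); return values proved equal on key-distinct inputs.


-- ===== PORT A =====
def distance2rank (component_dic : List (String × Int)) : List (String × Int) :=
  -- value_count = defaultdict(list); for key, value in …: value_count[value].append(key)
  let value_count : PySem.Dict Int (List String) :=
    component_dic.foldl (fun d p => d.modify p.2 [] (· ++ [p.1])) PySem.Dict.empty
  -- sorted_values = sorted(value_count.keys(), reverse=True)
  let sorted_values : List Int := PySem.List.sorted value_count.keys (fun x => x) true
  -- value_mapping = {value: i+1 for i, value in enumerate(sorted_values)}
  let value_mapping : PySem.Dict Int Int :=
    (PySem.List.enumerate sorted_values).foldl (fun d p => d.insert p.2 (p.1 + 1)) PySem.Dict.empty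
  -- rank_dict = {}; for key, value in …: rank_dict[key] = value_mapping[value]
  -- value_mapping[value] never raises (every value of component_dic is a key), so getD 0 is exact
  let rank_dict : PySem.Dict String Int :=
    component_dic.foldl (fun d p => d.insert p.1 (value_mapping.getD p.2 0)) PySem.Dict.empty
  rank_dict.items

-- ===== PORT B =====
def distance2rank_alt (component_dic : List (String × Int)) : List (String × Int) :=
  let distinct : PySem.Set Int := PySem.Set.ofList (component_dic.map Prod.snd)
  component_dic.map (fun p => (p.1, 1 + ((distinct.filter (fun d => p.2 < d)).length : Int)))

-- ===== PRECONDITION & SPEC =====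
-- Pre_ restricts to lists whose keys are pairwise distinct: only such association lists encode a
-- Python dict, which is the type A's and B's parameter actually has.
def Pre_distance2rank (component_dic : List (String × Int)) : Prop :=
  (component_dic.map Prod.fst).Nodup
instance (component_dic : List (String × Int)) : Decidable (Pre_distance2rank component_dic) := by
  unfold Pre_distance2rank; infer_instance
def pvWitness_distance2rank : (List (String × Int)) := [("a", 3), ("b", 1), ("c", 3)]

def Spec_distance2rank (component_dic : List (String × Int)) (out : List (String × Int)) : Prop := out = distance2rank_alt component_dic
instance (component_dic : List (String × Int)) (out : List (String × Int)) : Decidable (Spec_distance2rank component_dic out) := by unfold Spec_distance2rank; infer_instance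

-- ===== CLAIM (what is proved, stated in full; the proofs are below) =====
def Claim_equal_distance2rank : Prop := ∀ (component_dic : List (String × Int)), Dom_distance2rank component_dic → Pre_distance2rank component_dic → Spec_distance2rank component_dic (distance2rank component_dic)

-- ===== LEMMAS AND PROOFS =====

-- In a strictly decreasing list, the index of an element equals the number of strictly larger elements.
theorem idx_eq_filter_gt (L : List Int) (hL : L.Pairwise (fun a b => b < a)) (v : Int)
    (hv : v ∈ L) :
    PySem.List.index? L v = some ((L.filter (fun d => decide (v < d))).length) := by
  induction L with
  | nil => simp at hv
  | cons a t ih =>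
    rcases List.pairwise_cons.mp hL with ⟨ha, ht⟩
    by_cases hva : v = a
    · subst hva
      have hfilt : t.filter (fun d => decide (v < d)) = [] := by
        apply List.filter_eq_nil_iff.mpr
        intro d hd
        simp only [decide_eq_true_eq]
        exact not_lt.mpr (le_of_lt (ha d hd))
      rw [PySem.List.index?_cons_self]
      simp [hfilt]
    · have hvt : v ∈ t := by
        rcases List.mem_cons.mp hv with h | h
        · exact absurd h hva
        · exact h
      have hav : a ≠ v := fun h => hva h.symm
      have hlt : v < a := ha v hvt
      rw [PySem.List.index?_cons_of_ne t hav, ih ht hvt]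
      simp [hlt]

-- Lookup in the enumerate-built mapping: value v ∈ L maps to its index + 1.
theorem getD_valueMapping (L : List Int) (hnd : L.Nodup) (v : Int) (k : Nat)
    (hidx : PySem.List.index? L v = some k) :
    ((PySem.List.enumerate L).foldl (fun d p => d.insert p.2 (p.1 + 1)) PySem.Dict.empty).getD v 0
      = (k : Int) + 1 := by
  have hmapnd : ((PySem.List.enumerate L).map (fun p => p.2)).Nodup := by
    rw [PySem.List.map_snd_enumerate]; exact hnd
  have hitems :
      ((PySem.List.enumerate L).foldl (fun d p => d.insert p.2 (p.1 + 1)) PySem.Dict.empty).items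
        = (PySem.List.enumerate L).map (fun p => (p.2, p.1 + 1)) := by
    have h := PySem.Dict.items_foldl_insert_fresh (PySem.List.enumerate L)
      (fun p => p.2) (fun p => p.1 + 1) PySem.Dict.empty
      (by intro a _; rfl) hmapnd
    simpa using h
  have hkeysnd :
      ((PySem.List.enumerate L).foldl (fun d p => d.insert p.2 (p.1 + 1)) PySem.Dict.empty).keys.Nodup :=
    PySem.Dict.nodup_keys_foldl_insert_key (PySem.List.enumerate L) (fun (p : Int × Int) => p.2)
      (fun _ p => p.1 + 1) PySem.Dict.empty List.Pairwise.nil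
  rcases PySem.List.getElem_of_index?_eq_some hidx with ⟨hk, hLk, _⟩
  have hmem : (v, (k : Int) + 1) ∈
      ((PySem.List.enumerate L).foldl (fun d p => d.insert p.2 (p.1 + 1)) PySem.Dict.empty).items := by
    rw [hitems]
    refine List.mem_map.mpr ⟨((k : Int), v), ?_, rfl⟩
    exact (PySem.List.mem_enumerate_iff L 0 _).mpr ⟨k, hk, by simp [hLk]⟩
  exact PySem.Dict.getD_of_mem_items _ hmem hkeysnd 0

-- ===== VERDICT (by name: the statement is the Claim_ definition above) =====
theorem distance2rank_spec : Claim_equal_distance2rank := by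
  intro l _ hpre
  unfold Spec_distance2rank
  simp only [distance2rank, distance2rank_alt]
  have hkeys :
      (l.foldl (fun d (p : String × Int) => d.modify p.2 [] (· ++ [p.1])) PySem.Dict.empty).keys
        = PySem.Set.ofList (l.map Prod.snd) := by
    have h := PySem.Dict.keys_foldl_modify_key l Prod.snd ([] : List String)
      (fun d p v => v ++ [p.1]) PySem.Dict.empty
    simpa [PySem.Set.update_nil_left] using h
  rw [hkeys]
  set S : PySem.Set Int := PySem.Set.ofList (l.map Prod.snd) with hS
  set L : List Int := PySem.List.sorted S (fun x => x) true with hLdef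
  have hperm : L.Perm S := PySem.List.sorted_perm _ _ _
  have hLnd : L.Nodup := hperm.nodup_iff.mpr (PySem.Set.nodup_ofList _)
  have hdec : L.Pairwise (fun a b => b < a) := by
    have h1 : L.Pairwise (fun a b => b ≤ a) := PySem.List.sorted_pairwise_rev _ _
    have h2 : L.Pairwise (fun a b => a ≠ b) := hLnd
    exact (h1.and h2).imp (fun h => lt_of_le_of_ne h.1 (Ne.symm h.2))
  have hitems :
      (l.foldl (fun d (p : String × Int) =>
          d.insert p.1 (((PySem.List.enumerate L).foldl
            (fun d p => d.insert p.2 (p.1 + 1)) PySem.Dict.empty).getD p.2 0)) PySem.Dict.empty).items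
        = l.map (fun p => (p.1, ((PySem.List.enumerate L).foldl
            (fun d p => d.insert p.2 (p.1 + 1)) PySem.Dict.empty).getD p.2 0)) := by
    have h := PySem.Dict.items_foldl_insert_fresh l Prod.fst
      (fun p => ((PySem.List.enumerate L).foldl
        (fun d p => d.insert p.2 (p.1 + 1)) PySem.Dict.empty).getD p.2 0)
      PySem.Dict.empty (by intro a _; rfl) hpre
    simpa using h
  rw [hitems]
  apply List.map_congr_left
  intro p hp
  have hvS : p.2 ∈ S := (PySem.Set.mem_ofList _ _).mpr (List.mem_map.mpr ⟨p, hp, rfl⟩)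
  have hvL : p.2 ∈ L := hperm.mem_iff.mpr hvS
  have hidx := idx_eq_filter_gt L hdec p.2 hvL
  have hgd := getD_valueMapping L hLnd p.2 _ hidx
  rw [hgd]
  have hflen : (L.filter (fun d => decide (p.2 < d))).length
      = (S.filter (fun d => decide (p.2 < d))).length :=
    (hperm.filter _).length_eq
  simp only [hflen, Prod.mk.injEq, true_and]
  omega
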